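-- pv_equiv track=rewrite | github.com/hojoungjang/programming-exercises | 1213-팰린드롬-만들기/solution.py | solution
-- ===== SOURCE A (Python) =====
-- from collections import deque
--
-- NUM_OF_ALPHABETS = 26
--
-- def to_index(char):
--     return ord(char) - ord("A")
--
-- def solution(name):
--     counts = [0 for _ in range(NUM_OF_ALPHABETS)]
--     for char in name:
--         counts[to_index(char)] += 1
--
--     str_builder = deque()
--     if len(name) % 2 == 1:
--         for i, count in enumerate(counts):
--             if count % 2 == 1:
--                 str_builder.append(chr(i + ord("A")))
--                 counts[i] -= 1
--                 break
--         else: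
--             return "I'm Sorry Hansoo"
--
--     for i in reversed(range(len(counts))):
--         count = counts[i]
--         if count % 2 != 0:
--             return "I'm Sorry Hansoo"
--
--         for _ in range(0, count, 2):
--             str_builder.appendleft(chr(i + ord("A")))
--             str_builder.append(chr(i + ord("A")))
--
--     return "".join(str_builder)
-- ===== SOURCE B (Python) =====
-- def solution(name):
--     counts = [0] * 26
--     for char in name:
--         counts[ord(char) - ord("A")] += 1
--     odds = [i for i in range(26) if counts[i] % 2 == 1]
--     if len(odds) > 1:
--         return "I'm Sorry Hansoo"
--     mid = chr(odds[0] + ord("A")) if odds else ""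
--     left = "".join(chr(i + ord("A")) * (counts[i] // 2) for i in range(26))
--     return left + mid + left[::-1]
-- ===== Notes on version B (the rewrite author's own statement) =====
-- stated objective: simpler
-- what changed: B keeps the identical counting loop but replaces A's enumerate-with-break middle extraction plus center-out deque construction (appendleft/append over reversed(range(26))) by a direct half-build: collect the odd-count indices, bail out if there are more than one, and return left + mid + left[::-1].
-- outside the precondition, e.g. on solution('a'): A raises IndexError, B raises IndexError; on solution(' '): A raises IndexError, B raises IndexError
import Mathlib
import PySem

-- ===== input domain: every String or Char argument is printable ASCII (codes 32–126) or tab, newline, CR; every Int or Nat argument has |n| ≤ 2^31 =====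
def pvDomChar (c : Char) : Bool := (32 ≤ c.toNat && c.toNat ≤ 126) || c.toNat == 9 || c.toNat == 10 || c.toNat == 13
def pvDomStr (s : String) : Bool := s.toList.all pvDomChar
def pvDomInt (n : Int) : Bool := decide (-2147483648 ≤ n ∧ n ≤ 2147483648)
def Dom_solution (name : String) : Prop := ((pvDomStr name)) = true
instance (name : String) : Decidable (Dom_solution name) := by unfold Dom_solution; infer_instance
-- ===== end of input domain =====

-- B replaces A's center-out deque construction by a half-build: list the odd counts, then
-- return left + mid + reversed(left).  Objective: simpler.  Return value only.

-- ===== PORT A =====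
def toIndex (c : Char) : Int := (c.toNat : Int) - 65

-- the counting loop 'for char in name: counts[...] += 1', textually identical in Source A and
-- Source B, shared by both ports; none = IndexError
def countChars : List Char → List Int → Option (List Int)
  | [], cs => some cs
  | c :: rest, cs =>
    match PySem.List.pyGet? cs (toIndex c) with
    | none => none
    | some v =>
      match PySem.List.pySet? cs (toIndex c) (v + 1) with
      | none => none
      | some cs' => countChars rest cs'

def chrA (i : Int) : Char := Char.ofNat (i + 65).toNat

-- A's first-odd-extraction loop ('for i, count in enumerate(counts): … break / else return')
def findMid : List (Int × Int) → List Int → Option (List Char × List Int)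
  | [], _ => none
  | (i, count) :: rest, cs =>
    if PySem.Int.mod count 2 = 1 then
      some ([chrA i], PySem.List.pySetD cs i (PySem.List.pyGetD cs i 0 - 1))
    else findMid rest cs

-- A's deque loop over reversed(range(len(counts))): appendleft + append per pair
def mainLoop (cs : List Int) : List Int → List Char → String
  | [], dq => String.ofList dq
  | i :: rest, dq =>
    let count := PySem.List.pyGetD cs i 0
    if PySem.Int.mod count 2 ≠ 0 then "I'm Sorry Hansoo"
    else
      mainLoop cs rest
        ((PySem.List.pyRange 0 count 2).foldl (fun d _ => (chrA i :: d) ++ [chrA i]) dq)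

def solution (name : String) : String :=
  match countChars name.toList (List.replicate 26 0) with
  | none => ""  -- IndexError in the counting loop: excluded by Pre_solution
  | some counts0 =>
    if PySem.Int.mod (PySem.Str.len name) 2 = 1 then
      match findMid (PySem.List.enumerate counts0 0) counts0 with
      | none => "I'm Sorry Hansoo"
      | some (dq, counts) =>
          mainLoop counts ((PySem.List.pyRange 0 (counts.length : Int) 1).reverse) dq
    else
      mainLoop counts0 ((PySem.List.pyRange 0 (counts0.length : Int) 1).reverse) []

-- ===== PORT B =====
def chrB (i : Nat) : Char := Char.ofNat (i + 65)

def solution_alt (name : String) : String :=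
  match countChars name.toList (List.replicate 26 0) with
  | none => ""  -- IndexError in the counting loop: excluded by Pre_solution
  | some counts =>
    let odds := (List.range 26).filter (fun i => PySem.Int.mod (counts.getD i 0) 2 == 1)
    if odds.length > 1 then "I'm Sorry Hansoo"
    else
      let mid : List Char := match odds with | [] => [] | j :: _ => [chrB j]
      let left := (List.range 26).flatMap
        (fun i => List.replicate (PySem.Int.floordiv (counts.getD i 0) 2).toNat (chrB i))
      String.ofList (left ++ mid ++ left.reverse)

-- ===== PRECONDITION & SPEC =====
-- Pre_ excludes exactly the inputs on which A raises IndexError in the counting loop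
-- (a character whose code is outside [39, 90], i.e. ord(c)-65 outside [-26, 25]); B's
-- identical counting loop raises there too.
def Pre_solution (name : String) : Prop :=
  (name.toList.all (fun c => 39 ≤ c.toNat && c.toNat ≤ 90)) = true
instance (name : String) : Decidable (Pre_solution name) := by unfold Pre_solution; infer_instance
def pvWitness_solution : String := "ABA"

def Spec_solution (name : String) (out : String) : Prop := out = solution_alt name
instance (name : String) (out : String) : Decidable (Spec_solution name out) := by unfold Spec_solution; infer_instance

-- ===== CLAIM (what is proved, stated in full; the proofs are below) =====
def Claim_equal_solution : Prop := ∀ (name : String), Dom_solution name → Pre_solution name → Spec_solution name (solution name)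

-- ===== LEMMAS AND PROOFS =====

def oddP (x : Int) : Bool := decide (x % 2 = 1)

-- the half-block A's inner deque loop contributes for index i
def repA (cs : List Int) (i : Int) : List Char :=
  List.replicate ((PySem.List.pyRange 0 (PySem.List.pyGetD cs i 0) 2).length) (chrA i)

lemma oddP_beq (x : Int) : (PySem.Int.mod x 2 == 1) = oddP x := by
  rw [PySem.Int.mod_eq_emod_of_pos (by norm_num : (0:Int) < 2)]
  by_cases h : x % 2 = 1 <;> simp [oddP, h]

lemma getD_lt (cs : List Int) (k : Nat) (hk : k < cs.length) : cs.getD k 0 = cs[k] := by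
  rw [List.getD_eq_getElem?_getD, List.getElem?_eq_getElem hk]
  rfl

lemma chrA_cast (k : Nat) : chrA (k : Int) = chrB k := by
  unfold chrA chrB
  rw [show ((k : Int) + 65).toNat = k + 65 by omega]

lemma countP_set_flip (p : Int → Bool) : ∀ (cs : List Int) (n : Nat) (w : Int), n < cs.length →
    (cs.set n w).countP p + (if p (cs.getD n 0) then 1 else 0)
      = cs.countP p + (if p w then 1 else 0) := by
  intro cs
  induction cs with
  | nil => intro n w h; simp at h
  | cons x t ih =>
    intro n w h
    cases n with
    | zero =>
      simp only [List.set_cons_zero, List.countP_cons, List.getD_cons_zero]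
      split_ifs <;> omega
    | succ m =>
      have hih := ih m w (by simpa using h)
      rw [List.set_cons_succ]
      simp only [List.countP_cons, List.getD_cons_succ]
      split_ifs at hih ⊢ <;> omega

lemma pyGetSet (cs : List Int) (i : Int) (n : Nat) (hn : n < cs.length)
    (key : PySem.List.pyIdx? cs.length i = some n) :
    PySem.List.pyGet? cs i = some (cs.getD n 0) ∧
      PySem.List.pySet? cs i (cs.getD n 0 + 1) = some (cs.set n (cs.getD n 0 + 1)) := by
  constructor
  · simp [PySem.List.pyGet?, key, List.getElem?_eq_getElem hn]
  · simp [PySem.List.pySet?, key]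

lemma countStep (cs : List Int) (c : Char) (hc : 39 ≤ c.toNat ∧ c.toNat ≤ 90)
    (hlen : cs.length = 26) :
    ∃ n : Nat, n < 26 ∧ PySem.List.pyGet? cs (toIndex c) = some (cs.getD n 0) ∧
      PySem.List.pySet? cs (toIndex c) (cs.getD n 0 + 1) = some (cs.set n (cs.getD n 0 + 1)) := by
  have hi : toIndex c = (c.toNat : Int) - 65 := rfl
  by_cases h65 : 65 ≤ c.toNat
  · have key : PySem.List.pyIdx? cs.length (toIndex c) = some (c.toNat - 65) := by
      rw [hlen, hi]
      simp only [PySem.List.pyIdx?]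
      rw [if_pos (by omega), if_pos (by push_cast; omega)]
      congr 1
      omega
    obtain ⟨h1, h2⟩ := pyGetSet cs (toIndex c) (c.toNat - 65) (by omega) key
    exact ⟨c.toNat - 65, by omega, h1, h2⟩
  · have key : PySem.List.pyIdx? cs.length (toIndex c) = some (c.toNat - 39) := by
      rw [hlen, hi]
      simp only [PySem.List.pyIdx?]
      rw [if_neg (by omega), if_pos (by push_cast; omega)]
      congr 1
      omega
    obtain ⟨h1, h2⟩ := pyGetSet cs (toIndex c) (c.toNat - 39) (by omega) key
    exact ⟨c.toNat - 39, by omega, h1, h2⟩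

lemma countChars_facts : ∀ (l : List Char) (cs cs' : List Int),
    countChars l cs = some cs' → (∀ c ∈ l, 39 ≤ c.toNat ∧ c.toNat ≤ 90) →
    cs.length = 26 → (∀ x ∈ cs, 0 ≤ x) →
    cs'.length = 26 ∧ (∀ x ∈ cs', 0 ≤ x) ∧
      cs'.countP oddP % 2 = (cs.countP oddP + l.length) % 2 := by
  intro l
  induction l with
  | nil =>
    intro cs cs' h _ hlen hnn
    simp only [countChars, Option.some.injEq] at h
    subst h
    exact ⟨hlen, hnn, by simp⟩
  | cons c rest ih =>
    intro cs cs' h hdom hlen hnn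
    obtain ⟨n, hn, hget, hset⟩ := countStep cs c (hdom c (by simp)) hlen
    simp only [countChars, hget, hset] at h
    have hnl : n < cs.length := by omega
    have h1 := ih (cs.set n (cs.getD n 0 + 1)) cs' h
      (fun x hx => hdom x (by simp [hx])) (by simp [hlen])
      (by
        intro x hx
        rcases List.mem_or_eq_of_mem_set hx with hx' | hx'
        · exact hnn x hx'
        · have := hnn (cs.getD n 0) (by rw [getD_lt cs n hnl]; exact List.getElem_mem _)
          omega)
    refine ⟨h1.1, h1.2.1, ?_⟩
    have hflip := countP_set_flip oddP cs n (cs.getD n 0 + 1) hnl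
    have h2 := h1.2.2
    clear h h1 ih hnn hdom hget hset
    revert hflip h2
    generalize cs.getD n 0 = w0
    intro hflip h2
    by_cases hw : w0 % 2 = 1
    · have e1 : oddP w0 = true := by
        simp only [oddP]; exact decide_eq_true hw
      have e2 : oddP (w0 + 1) = false := by
        simp only [oddP, decide_eq_false_iff_not]; omega
      rw [e1, e2] at hflip
      simp at hflip
      simp only [List.length_cons]
      omega
    · have e1 : oddP w0 = false := by
        simp only [oddP, decide_eq_false_iff_not]; exact hw
      have e2 : oddP (w0 + 1) = true := by
        simp only [oddP]; exact decide_eq_true (by omega)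
      rw [e1, e2] at hflip
      simp at hflip
      simp only [List.length_cons]
      omega

lemma map_getD_range (cs : List Int) :
    (List.range cs.length).map (fun i => cs.getD i 0) = cs := by
  apply List.ext_getElem
  · simp
  · intro i h1 h2
    simp [List.getElem?_eq_getElem h2]

lemma filter_range_countP (cs : List Int) (p : Int → Bool) :
    ((List.range cs.length).filter (fun i => p (cs.getD i 0))).length = cs.countP p := by
  rw [← List.countP_eq_length_filter]
  have := List.countP_map (p := p) (f := fun i => cs.getD i 0) (l := List.range cs.length)
  rw [map_getD_range] at this
  simpa [Function.comp] using this.symm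

lemma least_of_filter_range (p : Nat → Bool) (n j : Nat) (t : List Nat)
    (h : (List.range n).filter p = j :: t) :
    p j = true ∧ j < n ∧ ∀ m < j, p m = false := by
  have hjmem : j ∈ (List.range n).filter p := by rw [h]; simp
  rw [List.mem_filter, List.mem_range] at hjmem
  refine ⟨hjmem.2, hjmem.1, ?_⟩
  intro m hm
  by_contra hpm
  have hpm' : p m = true := by simpa using hpm
  have hmmem : m ∈ (List.range n).filter p := by
    rw [List.mem_filter, List.mem_range]
    exact ⟨by omega, hpm'⟩
  have hpw : (j :: t).Pairwise (· < ·) := by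
    rw [← h]
    exact List.Pairwise.sublist List.filter_sublist List.pairwise_lt_range
  rw [h] at hmmem
  rcases List.mem_cons.mp hmmem with hmj | hmt
  · omega
  · have := (List.pairwise_cons.mp hpw).1 m hmt
    omega

lemma replicate_append_cons (n : Nat) (c : Char) (Y : List Char) :
    List.replicate n c ++ c :: Y = c :: (List.replicate n c ++ Y) := by
  rw [← List.singleton_append, ← List.append_assoc, ← List.replicate_succ',
    List.replicate_succ, List.cons_append]

lemma foldl_wrap (c : Char) : ∀ (l : List Int) (dq : List Char),
    l.foldl (fun d _ => (c :: d) ++ [c]) dq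
      = List.replicate l.length c ++ dq ++ List.replicate l.length c := by
  intro l
  induction l with
  | nil => simp
  | cons x t ih =>
    intro dq
    simp only [List.foldl_cons, ih, List.length_cons, List.replicate_succ]
    simp [replicate_append_cons]

lemma len_pyRange_even (cv : Int) (h2 : cv % 2 = 0) (h0 : 0 ≤ cv) :
    (PySem.List.pyRange 0 cv 2).length = (PySem.Int.floordiv cv 2).toNat := by
  rw [PySem.List.pyRange_of_pos 0 cv (by norm_num : (0:Int) < 2)]
  rw [PySem.Int.floordiv_eq_ediv_of_pos (by norm_num : (0:Int) < 2)]
  simp only [List.length_map, List.length_range]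
  split_ifs with h
  · omega
  · omega

lemma mainLoop_even (cs : List Int) : ∀ (idxs : List Int) (dq : List Char),
    (∀ i ∈ idxs, PySem.Int.mod (PySem.List.pyGetD cs i 0) 2 = 0) →
    mainLoop cs idxs dq
      = String.ofList (idxs.reverse.flatMap (repA cs) ++ dq ++ (idxs.reverse.flatMap (repA cs)).reverse) := by
  intro idxs
  induction idxs with
  | nil => intro dq _; simp [mainLoop]
  | cons i rest ih =>
    intro dq h
    have hi := h i (by simp)
    rw [show mainLoop cs (i :: rest) dq
        = (if PySem.Int.mod (PySem.List.pyGetD cs i 0) 2 ≠ 0 then "I'm Sorry Hansoo"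
           else mainLoop cs rest
             ((PySem.List.pyRange 0 (PySem.List.pyGetD cs i 0) 2).foldl
               (fun d _ => (chrA i :: d) ++ [chrA i]) dq)) from rfl]
    rw [if_neg (fun hne => hne hi)]
    rw [foldl_wrap]
    rw [ih _ (fun x hx => h x (by simp [hx]))]
    simp [repA, List.reverse_append, List.append_assoc]

lemma mainLoop_sorry (cs : List Int) : ∀ (idxs : List Int) (dq : List Char),
    (∃ i ∈ idxs, PySem.Int.mod (PySem.List.pyGetD cs i 0) 2 ≠ 0) →
    mainLoop cs idxs dq = "I'm Sorry Hansoo" := by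
  intro idxs
  induction idxs with
  | nil => intro dq h; simp at h
  | cons i rest ih =>
    intro dq h
    rw [show mainLoop cs (i :: rest) dq
        = (if PySem.Int.mod (PySem.List.pyGetD cs i 0) 2 ≠ 0 then "I'm Sorry Hansoo"
           else mainLoop cs rest
             ((PySem.List.pyRange 0 (PySem.List.pyGetD cs i 0) 2).foldl
               (fun d _ => (chrA i :: d) ++ [chrA i]) dq)) from rfl]
    by_cases hc : PySem.Int.mod (PySem.List.pyGetD cs i 0) 2 ≠ 0
    · rw [if_pos hc]
    · rw [if_neg hc]
      apply ih
      obtain ⟨x, hx, hox⟩ := h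
      rcases List.mem_cons.mp hx with hx' | hx'
      · exact absurd (hx' ▸ hox) hc
      · exact ⟨x, hx', hox⟩

lemma findMid_eq_find? : ∀ (pairs : List (Int × Int)) (cs : List Int),
    findMid pairs cs = (pairs.find? (fun p => PySem.Int.mod p.2 2 == 1)).map
      (fun p => ([chrA p.1], PySem.List.pySetD cs p.1 (PySem.List.pyGetD cs p.1 0 - 1))) := by
  intro pairs
  induction pairs with
  | nil => intro cs; simp [findMid]
  | cons p t ih =>
    intro cs
    obtain ⟨i, count⟩ := p
    have hm : PySem.Int.mod count 2 = count % 2 :=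
      PySem.Int.mod_eq_emod_of_pos (by norm_num : (0:Int) < 2)
    by_cases h : count % 2 = 1
    · have hb : (count % 2 == 1) = true := by simp [h]
      simp [findMid, h, List.find?]
    · have hb : (count % 2 == 1) = false := by simp [h]
      simp [findMid, h, List.find?, hb, ih]

lemma enum_find?_some (q : Int → Bool) : ∀ (cs : List Int) (s : Int) (k : Nat)
    (hk : k < cs.length), q (cs[k]) = true → (∀ m (hm : m < k), q (cs[m]'(by omega)) = false) →
    (PySem.List.enumerate cs s).find? (fun p => q p.2) = some (s + k, cs[k]) := by
  intro cs
  induction cs with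
  | nil => intro s k hk; simp at hk
  | cons x t ih =>
    intro s k hk hq hmin
    rw [PySem.List.enumerate_cons]
    cases k with
    | zero => simp_all [List.find?]
    | succ m =>
      have h0 : q x = false := hmin 0 (by omega)
      have hrec := ih (s+1) m (by simpa using hk) (by simpa using hq)
        (fun r hr => by simpa using hmin (r+1) (by omega))
      simp only [List.find?, h0]
      rw [hrec]
      have : s + 1 + (m : Int) = s + ((m + 1 : Nat) : Int) := by push_cast; ring
      rw [this]
      simp

lemma exists_odd_idx (cs : List Int) (hl : cs.length = 26) (hpos : 0 < cs.countP oddP) :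
    ∃ i ∈ (PySem.List.pyRange (0:Int) 26 1).reverse,
      PySem.Int.mod (PySem.List.pyGetD cs i 0) 2 ≠ 0 := by
  obtain ⟨x, hx, hpx⟩ := List.countP_pos_iff.mp hpos
  obtain ⟨k, hk, rfl⟩ := List.mem_iff_getElem.mp hx
  have hk26 : k < 26 := by omega
  refine ⟨(k : Int), ?_, ?_⟩
  · rw [List.mem_reverse, PySem.List.mem_pyRange_one]
    exact ⟨Int.natCast_nonneg k, by exact_mod_cast hk26⟩
  · rw [PySem.List.pyGetD_eq_getElem cs 0 (Int.natCast_nonneg k) (by exact_mod_cast hk)]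
    rw [PySem.Int.mod_eq_emod_of_pos (by norm_num : (0:Int) < 2)]
    simp only [Int.toNat_natCast]
    simp [oddP] at hpx
    omega

lemma allEven_idx (cs : List Int) (hl : cs.length = 26) (h0 : cs.countP oddP = 0)
    (hnn : ∀ x ∈ cs, 0 ≤ x) :
    ∀ i ∈ (PySem.List.pyRange (0:Int) 26 1).reverse,
      PySem.Int.mod (PySem.List.pyGetD cs i 0) 2 = 0 := by
  intro i hi
  rw [List.mem_reverse, PySem.List.mem_pyRange_one] at hi
  rw [PySem.List.pyGetD_eq_getElem cs 0 hi.1 (by rw [hl]; exact_mod_cast hi.2)]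
  rw [PySem.Int.mod_eq_emod_of_pos (by norm_num : (0:Int) < 2)]
  have hmem : cs[i.toNat]'(by rw [hl]; omega) ∈ cs := List.getElem_mem _
  have := (List.countP_eq_zero.mp h0) _ hmem
  simp [oddP] at this
  omega

lemma build_eq (cs : List Int) (h : ∀ k, k < 26 → 0 ≤ cs.getD k 0 ∧ cs.getD k 0 % 2 = 0) :
    (PySem.List.pyRange (0:Int) 26 1).flatMap (repA cs)
      = (List.range 26).flatMap
          (fun i => List.replicate (PySem.Int.floordiv (cs.getD i 0) 2).toNat (chrB i)) := by
  rw [show PySem.List.pyRange (0:Int) 26 1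
      = List.map (fun k : Nat => ((k : Int))) (List.range 26) by
    rw [show PySem.List.pyRange (0:Int) 26 1 = PySem.List.pyRange (0:Int) 26 from rfl,
      PySem.List.pyRange_one]
    norm_num
    rfl]
  rw [List.flatMap_map]
  apply List.flatMap_congr
  intro k hk
  have hk26 : k < 26 := List.mem_range.mp hk
  obtain ⟨hnn, hev⟩ := h k hk26
  show repA cs ((k : Int)) = _
  unfold repA
  rw [PySem.List.pyGetD_natCast, chrA_cast, len_pyRange_even _ hev hnn]

lemma getD_set (cs : List Int) (n k : Nat) (w : Int) (hn : n < cs.length) :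
    (cs.set n w).getD k 0 = if n = k then w else cs.getD k 0 := by
  rw [List.getD_eq_getElem?_getD, List.getElem?_set, List.getD_eq_getElem?_getD]
  split_ifs <;> first | rfl | omega

-- ===== VERDICT (by name: the statement is the Claim_ definition above) =====
theorem solution_spec : Claim_equal_solution := by
  intro name _ hpre
  have hpre' : ∀ c ∈ name.toList, 39 ≤ c.toNat ∧ c.toNat ≤ 90 := by
    intro c hcmem
    have := (List.all_eq_true.mp hpre) c hcmem
    simpa using this
  unfold Spec_solution
  cases hc : countChars name.toList (List.replicate 26 0) with
  | none => simp only [solution, solution_alt, hc]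
  | some counts =>
    obtain ⟨hlen26, hnn, hpar⟩ := countChars_facts name.toList (List.replicate 26 0) counts hc
      hpre' (by simp)
      (by intro x hx; have := List.eq_of_mem_replicate hx; omega)
    have hrep0 : (List.replicate 26 (0:Int)).countP oddP = 0 := by
      rw [List.countP_eq_zero]
      intro a ha
      rw [List.eq_of_mem_replicate ha]
      simp [oddP]
    rw [hrep0, Nat.zero_add] at hpar
    have hpredB : (fun i : Nat => (PySem.Int.mod (counts.getD i 0) 2 == 1))
        = (fun i : Nat => oddP (counts.getD i 0)) := funext fun i => oddP_beq _
    have hoddlen : ((List.range 26).filter (fun i => oddP (counts.getD i 0))).length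
        = counts.countP oddP := by
      have h := filter_range_countP counts oddP
      rw [hlen26] at h
      exact h
    have hmodlen : PySem.Int.mod (PySem.Str.len name) 2 = ((name.toList.length : Int) % 2) := by
      rw [PySem.Str.len_eq, PySem.Int.mod_eq_emod_of_pos (by norm_num : (0:Int) < 2)]
    have h26 : ((counts.length : Nat) : Int) = (26 : Int) := by rw [hlen26]; norm_num
    have hgetnn : ∀ k, k < 26 → 0 ≤ counts.getD k 0 := by
      intro k hk
      rw [getD_lt counts k (by omega)]
      exact hnn _ (List.getElem_mem _)
    by_cases hz : counts.countP oddP = 0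
    · -- no odd count: even-length palindrome on both sides
      have hodds_nil : (List.range 26).filter (fun i => oddP (counts.getD i 0)) = [] := by
        rw [← List.length_eq_zero_iff, hoddlen, hz]
      have heven : ¬ PySem.Int.mod (PySem.Str.len name) 2 = 1 := by
        rw [hmodlen]; omega
      have hall : ∀ k, k < 26 → 0 ≤ counts.getD k 0 ∧ counts.getD k 0 % 2 = 0 := by
        intro k hk
        refine ⟨hgetnn k hk, ?_⟩
        have hmem : counts.getD k 0 ∈ counts := by
          rw [getD_lt counts k (by omega)]; exact List.getElem_mem _
        have := (List.countP_eq_zero.mp hz) _ hmem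
        simp only [oddP, decide_eq_true_eq] at this
        omega
      simp only [solution, solution_alt, hc]
      rw [if_neg heven, hpredB, hodds_nil, h26]
      rw [mainLoop_even counts _ [] (allEven_idx counts hlen26 hz hnn)]
      rw [List.reverse_reverse, build_eq counts hall]
      simp
    · by_cases ho : counts.countP oddP = 1
      · -- exactly one odd count: odd-length palindrome with a middle letter
        obtain ⟨j, hj⟩ := List.length_eq_one_iff.mp (by rw [hoddlen, ho] :
          ((List.range 26).filter (fun i => oddP (counts.getD i 0))).length = 1)
        obtain ⟨hpj, hj26, hmin⟩ := least_of_filter_range _ 26 j _ hj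
        have hjlen : j < counts.length := by omega
        have hlenodd : PySem.Int.mod (PySem.Str.len name) 2 = 1 := by
          rw [hmodlen]; omega
        have hfm : findMid (PySem.List.enumerate counts 0) counts
            = some ([chrA (j:Int)],
                PySem.List.pySetD counts (j:Int) (PySem.List.pyGetD counts (j:Int) 0 - 1)) := by
          rw [findMid_eq_find?,
            show (fun p : Int × Int => (PySem.Int.mod p.2 2 == 1))
              = (fun p : Int × Int => oddP p.2) from funext fun p => oddP_beq _,
            enum_find?_some oddP counts 0 j hjlen
              (by rw [← getD_lt counts j hjlen]; exact hpj)
              (fun m hm => by rw [← getD_lt counts m (by omega)]; exact hmin m hm)]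
          simp
        have hset' : PySem.List.pySetD counts (j:Int) (PySem.List.pyGetD counts (j:Int) 0 - 1)
            = counts.set j (counts.getD j 0 - 1) := by
          rw [PySem.List.pyGetD_natCast, PySem.List.pySetD_natCast]
        have hpj' : counts.getD j 0 % 2 = 1 := by
          simpa only [oddP, decide_eq_true_eq] using hpj
        have e2 : oddP (counts.getD j 0 - 1) = false := by
          simp only [oddP, decide_eq_false_iff_not]; omega
        have hflip := countP_set_flip oddP counts j (counts.getD j 0 - 1) hjlen
        rw [hpj, e2, if_pos rfl, if_neg Bool.false_ne_true] at hflip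
        have hC0 : (counts.set j (counts.getD j 0 - 1)).countP oddP = 0 := by omega
        have hnn' : ∀ x ∈ counts.set j (counts.getD j 0 - 1), 0 ≤ x := by
          intro x hx
          rcases List.mem_or_eq_of_mem_set hx with hx' | hx'
          · exact hnn x hx'
          · have := hgetnn j hj26
            omega
        have hall' : ∀ k, k < 26 →
            0 ≤ (counts.set j (counts.getD j 0 - 1)).getD k 0 ∧
              (counts.set j (counts.getD j 0 - 1)).getD k 0 % 2 = 0 := by
          intro k hk
          rw [getD_set counts j k _ hjlen]
          split_ifs with hjk
          · subst hjk
            have := hgetnn j hj26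
            omega
          · refine ⟨hgetnn k hk, ?_⟩
            have hmem : counts.getD k 0 ∈ counts.set j (counts.getD j 0 - 1) := by
              have hkl : k < (counts.set j (counts.getD j 0 - 1)).length := by simp; omega
              have : (counts.set j (counts.getD j 0 - 1))[k]'hkl = counts.getD k 0 := by
                rw [← getD_lt _ k hkl, getD_set counts j k _ hjlen, if_neg hjk]
              rw [← this]
              exact List.getElem_mem _
            have := (List.countP_eq_zero.mp hC0) _ hmem
            simp only [oddP, decide_eq_true_eq] at this
            omega
        have hhalf : ∀ k ∈ List.range 26,
            List.replicate (PySem.Int.floordiv ((counts.set j (counts.getD j 0 - 1)).getD k 0) 2).toNat (chrB k)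
              = List.replicate (PySem.Int.floordiv (counts.getD k 0) 2).toNat (chrB k) := by
          intro k hk
          rw [getD_set counts j k _ hjlen]
          split_ifs with hjk
          · subst hjk
            rw [PySem.Int.floordiv_eq_ediv_of_pos (by norm_num : (0:Int) < 2),
              PySem.Int.floordiv_eq_ediv_of_pos (by norm_num : (0:Int) < 2)]
            congr 2
            omega
          · rfl
        simp only [solution, solution_alt, hc]
        rw [if_pos hlenodd, hfm, hset', hpredB, hj]
        simp only [List.length_set, h26]
        rw [mainLoop_even _ _ _ (allEven_idx _ (by simp [hlen26]) hC0 hnn')]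
        rw [List.reverse_reverse, build_eq _ hall']
        rw [List.flatMap_congr hhalf]
        simp [chrA_cast]
      · -- two or more odd counts: both return "I'm Sorry Hansoo"
        have h2le : 2 ≤ counts.countP oddP := by omega
        have hBs : solution_alt name = "I'm Sorry Hansoo" := by
          simp only [solution_alt, hc]
          rw [hpredB, if_pos (by rw [hoddlen]; omega)]
        rw [hBs]
        by_cases hm1 : PySem.Int.mod (PySem.Str.len name) 2 = 1
        · cases hfil : (List.range 26).filter (fun i => oddP (counts.getD i 0)) with
          | nil => rw [hfil] at hoddlen; simp at hoddlen; omega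
          | cons j t =>
            obtain ⟨hpj, hj26, hmin⟩ := least_of_filter_range _ 26 j _ hfil
            have hjlen : j < counts.length := by omega
            have hfm : findMid (PySem.List.enumerate counts 0) counts
                = some ([chrA (j:Int)],
                    PySem.List.pySetD counts (j:Int) (PySem.List.pyGetD counts (j:Int) 0 - 1)) := by
              rw [findMid_eq_find?,
                show (fun p : Int × Int => (PySem.Int.mod p.2 2 == 1))
                  = (fun p : Int × Int => oddP p.2) from funext fun p => oddP_beq _,
                enum_find?_some oddP counts 0 j hjlen
                  (by rw [← getD_lt counts j hjlen]; exact hpj)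
                  (fun m hm => by rw [← getD_lt counts m (by omega)]; exact hmin m hm)]
              simp
            have hset' : PySem.List.pySetD counts (j:Int) (PySem.List.pyGetD counts (j:Int) 0 - 1)
                = counts.set j (counts.getD j 0 - 1) := by
              rw [PySem.List.pyGetD_natCast, PySem.List.pySetD_natCast]
            have hpj' : counts.getD j 0 % 2 = 1 := by
              simpa only [oddP, decide_eq_true_eq] using hpj
            have e2 : oddP (counts.getD j 0 - 1) = false := by
              simp only [oddP, decide_eq_false_iff_not]; omega
            have hflip := countP_set_flip oddP counts j (counts.getD j 0 - 1) hjlen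
            rw [hpj, e2, if_pos rfl, if_neg Bool.false_ne_true] at hflip
            simp only [solution, hc]
            rw [if_pos hm1, hfm, hset']
            simp only [List.length_set, h26]
            exact mainLoop_sorry _ _ _
              (exists_odd_idx _ (by simp [hlen26]) (by omega))
        · simp only [solution, hc]
          rw [if_neg hm1, h26]
          exact mainLoop_sorry _ _ _ (exists_odd_idx _ hlen26 (by omega))
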